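-- pv_equiv track=rewrite | github.com/Vagacoder/Codesignal | python/Arcade/Core/C119RowRearranging.py | rowsRearranging1
-- ===== SOURCE A (Python) =====
-- def rowsRearranging1(matrix: list)-> bool:
--     n = len(matrix)
--     m = len(matrix[0])
--
--     def checkMatrix(ma:list)-> bool:
--         for j in range(m):
--             for i in range(1, n):
--                 if ma[i][j]<= ma[i-1][j]:
--                     return False
--         return True
--
--
--     for k in range(m):
--         matrix.sort(key=lambda x : x[k])
--         if checkMatrix(matrix):
--             return True
--
--     return False
-- ===== SOURCE B (Python) =====
-- def rowsRearranging1(matrix: list) -> bool: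
--     # Sort rows once by column 0, then check every column strictly increases.
--     # (Unlike A, does not mutate the argument; return value is the same.)
--     n = len(matrix)
--     m = len(matrix[0])
--     if m == 0:
--         return False
--     rows = sorted(matrix, key=lambda r: r[0])
--     return all(rows[i][j] < rows[i + 1][j] for i in range(n - 1) for j in range(m))
-- ===== Notes on version B (the rewrite author's own statement) =====
-- stated objective: faster
-- what changed: A re-sorts the whole matrix once per column and re-checks all columns each time; B sorts the rows once by column 0 (the unique candidate arrangement) and does a single strict-increase check over all columns; A also mutates its argument in place, B does not (return value identical).
import Mathlib
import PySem

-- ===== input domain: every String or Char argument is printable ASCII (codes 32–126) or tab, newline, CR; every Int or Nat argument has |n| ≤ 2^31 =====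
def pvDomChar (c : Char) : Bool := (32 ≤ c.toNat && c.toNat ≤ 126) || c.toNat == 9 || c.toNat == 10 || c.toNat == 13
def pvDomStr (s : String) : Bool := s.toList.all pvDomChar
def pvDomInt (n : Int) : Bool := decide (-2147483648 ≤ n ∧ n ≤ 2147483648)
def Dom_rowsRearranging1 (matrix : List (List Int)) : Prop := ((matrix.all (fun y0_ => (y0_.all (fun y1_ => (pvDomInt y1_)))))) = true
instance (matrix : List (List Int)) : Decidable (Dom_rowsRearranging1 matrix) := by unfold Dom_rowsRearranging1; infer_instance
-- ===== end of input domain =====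

-- B sorts the rows once by column 0 and checks all columns strictly increase, instead of
-- A's sort-per-column retry loop (faster in a timing run; A also mutates its argument
-- in place while B does not — the claim is about the return value only).

-- ===== PORT A =====
-- checkMatrix: for j in range(m): for i in range(1, n): if ma[i][j] <= ma[i-1][j]: return False; return True
def pvCheckMatrix (m n : Nat) (ma : List (List Int)) : Bool :=
  (List.range m).all (fun j =>
    (List.range' 1 (n - 1)).all (fun i =>
      !decide ((ma.getD i []).getD j 0 ≤ (ma.getD (i - 1) []).getD j 0)))

-- for k in range(m): matrix.sort(key=lambda x: x[k]); if checkMatrix(matrix): return True; return False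
-- (indexing ported with getD; Pre_ keeps every index in range, where getD equals Python's indexing)
def pvLoopA (m n : Nat) (mat : List (List Int)) : List Nat → Bool
  | [] => false
  | k :: ks =>
      let s := PySem.List.sorted mat (fun x => x.getD k 0) false
      if pvCheckMatrix m n s then true else pvLoopA m n s ks

def rowsRearranging1 (matrix : List (List Int)) : Bool :=
  pvLoopA (matrix.headD []).length matrix.length matrix
    (List.range (matrix.headD []).length)

-- ===== PORT B =====
def rowsRearranging1_alt (matrix : List (List Int)) : Bool :=
  let n := matrix.length
  let m := (matrix.headD []).length
  if m = 0 then false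
  else
    let rows := PySem.List.sorted matrix (fun r => r.getD 0 0) false
    (List.range (n - 1)).all (fun i =>
      (List.range m).all (fun j =>
        decide ((rows.getD i []).getD j 0 < (rows.getD (i + 1) []).getD j 0)))

-- ===== PRECONDITION & SPEC =====
-- Pre_ excludes exactly the inputs where the Python A raises IndexError: the empty matrix
-- (matrix[0]) and ragged matrices with some row shorter than the first (sort key x[k] /
-- ma[i][j] out of range).  A returns normally on every other input.
def Pre_rowsRearranging1 (matrix : List (List Int)) : Prop :=
  matrix ≠ [] ∧ ∀ row ∈ matrix, (matrix.headD []).length ≤ row.length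
instance (matrix : List (List Int)) : Decidable (Pre_rowsRearranging1 matrix) := by
  unfold Pre_rowsRearranging1; infer_instance
def pvWitness_rowsRearranging1 : List (List Int) := [[1, 2], [3, 4]]

def Spec_rowsRearranging1 (matrix : List (List Int)) (out : Bool) : Prop := out = rowsRearranging1_alt matrix
instance (matrix : List (List Int)) (out : Bool) : Decidable (Spec_rowsRearranging1 matrix out) := by unfold Spec_rowsRearranging1; infer_instance

-- ===== CLAIM (what is proved, stated in full; the proofs are below) =====
def Claim_equal_rowsRearranging1 : Prop := ∀ (matrix : List (List Int)), Dom_rowsRearranging1 matrix → Pre_rowsRearranging1 matrix → Spec_rowsRearranging1 matrix (rowsRearranging1 matrix)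

-- ===== LEMMAS AND PROOFS =====

-- "P is a valid arrangement for the first m columns": every column j < m strictly increases.
def pvValid (m : Nat) (P : List (List Int)) : Prop :=
  ∀ i, i + 1 < P.length → ∀ j < m, (P.getD i []).getD j 0 < (P.getD (i + 1) []).getD j 0

theorem pvCheckMatrix_iff (m : Nat) (ma : List (List Int)) :
    pvCheckMatrix m ma.length ma = true ↔ pvValid m ma := by
  simp only [pvCheckMatrix, List.all_eq_true, List.mem_range, List.mem_range'_1,
    Bool.not_eq_true', decide_eq_false_iff_not, not_le, pvValid]
  constructor
  · intro h i hi j hj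
    have := h j hj (i + 1) ⟨Nat.le_add_left 1 i, by omega⟩
    simpa using this
  · intro h j hj i ⟨h1, h2⟩
    obtain ⟨i', rfl⟩ : ∃ i', i = i' + 1 := ⟨i - 1, by omega⟩
    simpa using h i' (by omega) j hj

theorem pvAltCheck_iff (m : Nat) (rows : List (List Int)) :
    ((List.range (rows.length - 1)).all (fun i =>
      (List.range m).all (fun j =>
        decide ((rows.getD i []).getD j 0 < (rows.getD (i + 1) []).getD j 0))) = true)
      ↔ pvValid m rows := by
  simp only [List.all_eq_true, List.mem_range, decide_eq_true_eq, pvValid]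
  constructor
  · intro h i hi j hj; exact h i (by omega) j hj
  · intro h i hi j hj; exact h i (by omega) j hj

-- adjacent strict increase in column 0 gives strict increase between any two positions
theorem pvValid_mono (m : Nat) (hm : 0 < m) (P : List (List Int)) (h : pvValid m P) :
    ∀ i j, i < j → j < P.length →
      (P.getD i []).getD 0 0 < (P.getD j []).getD 0 0 := by
  intro i j hij hj
  induction j with
  | zero => omega
  | succ j ih =>
      have hstep : (P.getD j []).getD 0 0 < (P.getD (j + 1) []).getD 0 0 :=
        h j hj 0 hm
      rcases Nat.lt_succ_iff_lt_or_eq.mp hij with h' | rfl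
      · exact lt_trans (ih h' (by omega)) hstep
      · exact hstep

theorem pvValid_pairwise (m : Nat) (hm : 0 < m) (P : List (List Int)) (h : pvValid m P) :
    P.Pairwise (fun a b => a.getD 0 0 < b.getD 0 0) := by
  rw [List.pairwise_iff_getElem]
  intro i j hi hj hij
  have := pvValid_mono m hm P h i j hij hj
  simpa [List.getD_eq_getElem?_getD, List.getElem?_eq_getElem, hi, hj] using this

-- if no valid arrangement is reachable by the column-0 sort, A's loop never succeeds
theorem pvLoopA_false (matrix : List (List Int)) (m : Nat) (hm : 0 < m)
    (hno : ¬ pvValid m (PySem.List.sorted matrix (fun r => r.getD 0 0) false)) :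
    ∀ ks (mat : List (List Int)), mat.Perm matrix →
      pvLoopA m matrix.length mat ks = false := by
  intro ks
  induction ks with
  | nil => intro mat _; rfl
  | cons k ks ih =>
      intro mat hperm
      have hsp : (PySem.List.sorted mat (fun x => x.getD k 0) false).Perm matrix :=
        (PySem.List.sorted_perm mat _ false).trans hperm
      have hlen : (PySem.List.sorted mat (fun x => x.getD k 0) false).length = matrix.length :=
        hsp.length_eq
      simp only [pvLoopA]
      rw [if_neg]
      · exact ih _ hsp
      · intro hchk
        have hvalid : pvValid m (PySem.List.sorted mat (fun x => x.getD k 0) false) := by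
          rw [← hlen] at hchk
          exact (pvCheckMatrix_iff m _).mp hchk
        have hpw := pvValid_pairwise m hm _ hvalid
        have := PySem.List.sorted_eq_of_perm_of_pairwise_lt matrix
          (PySem.List.sorted mat (fun x => x.getD k 0) false)
          (fun r : List Int => r.getD 0 0) hsp hpw
        exact hno (this ▸ hvalid)

theorem rowsRearranging1_eq (matrix : List (List Int)) :
    rowsRearranging1 matrix = rowsRearranging1_alt matrix := by
  unfold rowsRearranging1 rowsRearranging1_alt
  by_cases hm : (matrix.headD []).length = 0
  · rw [hm]; rfl
  · have hm' : 0 < (matrix.headD []).length := Nat.pos_of_ne_zero hm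
    simp only [if_neg hm]
    set m := (matrix.headD []).length with hmdef
    set s0 := PySem.List.sorted matrix (fun r => r.getD 0 0) false with hs0
    have hlen0 : s0.length = matrix.length :=
      (PySem.List.sorted_perm matrix _ false).length_eq
    by_cases hv : pvValid m s0
    · -- both sides are true: A succeeds at k = 0
      have hB : ((List.range (matrix.length - 1)).all (fun i =>
          (List.range m).all (fun j =>
            decide ((s0.getD i []).getD j 0 < (s0.getD (i + 1) []).getD j 0))) = true) := by
        rw [← hlen0]; exact (pvAltCheck_iff m s0).mpr hv
      have hA : pvCheckMatrix m matrix.length s0 = true := by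
        rw [← hlen0]; exact (pvCheckMatrix_iff m s0).mpr hv
      obtain ⟨m', hm2⟩ : ∃ m', m = m' + 1 := ⟨m - 1, by omega⟩
      rw [hm2] at hA hB ⊢
      rw [List.range_succ_eq_map]
      simp only [pvLoopA]
      rw [if_pos hA, ← List.range_succ_eq_map]
      exact hB.symm
    · -- both sides are false
      have hB : ((List.range (matrix.length - 1)).all (fun i =>
          (List.range m).all (fun j =>
            decide ((s0.getD i []).getD j 0 < (s0.getD (i + 1) []).getD j 0)))) = false := by
        rw [← hlen0]
        exact Bool.eq_false_iff.mpr (fun h => hv ((pvAltCheck_iff m s0).mp h))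
      rw [hB]
      exact pvLoopA_false matrix m hm' hv (List.range m) matrix (List.Perm.refl _)

-- ===== VERDICT (by name: the statement is the Claim_ definition above) =====
theorem rowsRearranging1_spec : Claim_equal_rowsRearranging1 := by
  intro matrix _ _
  exact rowsRearranging1_eq matrix
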